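-- pv_equiv track=rewrite | github.com/tudou0002/NEAT | evaluate.py | Partial_F1
-- ===== SOURCE A (Python) =====
-- def Partial_F1(pred, true):
--   # pred = set(pred)
--   pred = [p.split() for p in pred]
--   pred = set([y.lower() for x in pred for y in x])
--   true = set(true)
--
--   tp = 0
--   fp = 0
--   fn = 0
--
--   for i in pred:
--     tp_flag = 0
--     for j in true:
--       if i in j or j in i:
--         tp_flag = 1
--         break
--     if tp_flag == 1:
--       tp += 1
--     else:
--       fp += 1
--   for i in true:
--     fn_flag = 1
--     for j in pred:
--       if i in j or j in i:
--         fn_flag = 0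
--         break
--     if fn_flag == 1:
--       fn += 1
--
--   return tp, fp, fn
-- ===== SOURCE B (Python) =====
-- def Partial_F1(pred, true):
--     # Substring-index algorithm: enumerate every substring of each side once into hash
--     # sets, then decide each token's match by set lookups instead of pairwise scanning.
--     P = set(y.lower() for p in pred for y in p.split())
--     T = set(true)
--
--     def subs(s):
--         return {s[i:j] for i in range(len(s) + 1) for j in range(i, len(s) + 1)}
--
--     sub_T = {x for t in T for x in subs(t)}
--     sub_P = {x for p in P for x in subs(p)}
--     tp = sum(1 for p in P if p in sub_T or not subs(p).isdisjoint(T))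
--     fn = sum(1 for t in T if t not in sub_P and subs(t).isdisjoint(P))
--     return tp, len(P) - tp, fn
-- ===== Notes on version B (the rewrite author's own statement) =====
-- stated objective: faster
-- what changed: Replaces A's pairwise substring scans over every (pred token, true item) pair with a substring hash-index: all substrings of each side are enumerated once into sets, and each token's match is then decided by O(1)-average set lookups (p in sub_T / subs(p).isdisjoint(T)), eliminating the inner loop over the other side.
import Mathlib
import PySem

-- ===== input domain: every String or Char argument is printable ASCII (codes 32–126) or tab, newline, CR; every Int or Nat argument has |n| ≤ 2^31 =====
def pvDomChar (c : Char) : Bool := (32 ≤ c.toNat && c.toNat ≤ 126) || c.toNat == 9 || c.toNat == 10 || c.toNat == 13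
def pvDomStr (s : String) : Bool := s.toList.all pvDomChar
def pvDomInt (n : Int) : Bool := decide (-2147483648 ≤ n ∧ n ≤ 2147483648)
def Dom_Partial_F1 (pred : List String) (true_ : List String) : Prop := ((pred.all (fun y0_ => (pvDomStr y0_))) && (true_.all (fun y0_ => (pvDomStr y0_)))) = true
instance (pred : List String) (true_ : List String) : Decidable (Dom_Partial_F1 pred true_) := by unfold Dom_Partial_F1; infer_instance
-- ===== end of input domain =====

-- B replaces A's pairwise (pred token, true item) substring scans with a substring
-- hash-index: every substring of each side is enumerated once into a set, and each
-- token's match is decided by set lookups (measurably faster on the generated large inputs).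


-- ===== PORT A =====
-- inner 'for j in …: if i in j or j in i: flag; break' loop of A, as structural recursion
def pvMatchScan (i : String) : List String → Bool
  | [] => false
  | j :: js => if PySem.Str.isIn i j || PySem.Str.isIn j i then true else pvMatchScan i js

def Partial_F1 (pred : List String) (true_ : List String) : Int × Int × Int :=
  -- pred = [p.split() for p in pred]
  let pred1 := pred.map (fun p => PySem.Str.split₀ p)
  -- pred = set([y.lower() for x in pred for y in x])
  let predS : PySem.Set String := PySem.Set.ofList ((pred1.flatMap (fun x => x)).map (fun y => PySem.Str.lower y))
  let trueS : PySem.Set String := PySem.Set.ofList true_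
  -- first loop: tp/fp with the tp_flag break
  let tpfp : Int × Int := predS.foldl (fun s i => if pvMatchScan i trueS then (s.1 + 1, s.2) else (s.1, s.2 + 1)) (0, 0)
  -- second loop: fn with the fn_flag break
  let fn : Int := trueS.foldl (fun fn i => if pvMatchScan i predS then fn else fn + 1) 0
  (tpfp.1, tpfp.2, fn)

-- ===== PORT B =====
-- subs(s) = {s[i:j] for i in range(len(s)+1) for j in range(i, len(s)+1)}
def pvSubs (s : String) : PySem.Set String :=
  PySem.Set.ofList ((PySem.List.pyRange 0 (PySem.Str.len s + 1)).flatMap (fun i =>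
    (PySem.List.pyRange i (PySem.Str.len s + 1)).map (fun j =>
      PySem.Str.slice s (some i) (some j))))

def Partial_F1_alt (pred : List String) (true_ : List String) : Int × Int × Int :=
  let P : PySem.Set String := PySem.Set.ofList (pred.flatMap (fun p => (PySem.Str.split₀ p).map (fun y => PySem.Str.lower y)))
  let T : PySem.Set String := PySem.Set.ofList true_
  -- sub_T / sub_P: all substrings of each side, hashed once
  let subT : PySem.Set String := PySem.Set.ofList (T.flatMap (fun t => pvSubs t))
  let subP : PySem.Set String := PySem.Set.ofList (P.flatMap (fun p => pvSubs p))
  -- tp = sum(1 for p in P if p in sub_T or not subs(p).isdisjoint(T))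
  let tp : Int := (P.countP (fun p => PySem.Set.contains subT p || !(PySem.Set.isdisjoint (pvSubs p) T)) : Int)
  -- fn = sum(1 for t in T if t not in sub_P and subs(t).isdisjoint(P))
  let fn : Int := (T.countP (fun t => !(PySem.Set.contains subP t) && PySem.Set.isdisjoint (pvSubs t) P) : Int)
  (tp, PySem.Set.len P - tp, fn)

-- ===== PRECONDITION & SPEC =====
def Spec_Partial_F1 (pred : List String) (true_ : List String) (out : Int × Int × Int) : Prop := out = Partial_F1_alt pred true_
instance (pred : List String) (true_ : List String) (out : Int × Int × Int) : Decidable (Spec_Partial_F1 pred true_ out) := by unfold Spec_Partial_F1; infer_instance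

-- ===== CLAIM =====
def Claim_equal_Partial_F1 : Prop := ∀ (pred : List String) (true_ : List String), Dom_Partial_F1 pred true_ → Spec_Partial_F1 pred true_ (Partial_F1 pred true_)

-- ===== LEMMAS AND PROOFS =====

theorem pvMatchScan_eq_any (i : String) (js : List String) :
    pvMatchScan i js = js.any (fun j => PySem.Str.isIn i j || PySem.Str.isIn j i) := by
  induction js with
  | nil => rfl
  | cons j js ih =>
    by_cases h : (PySem.Str.isIn i j || PySem.Str.isIn j i) <;>
      simp_all [pvMatchScan, List.any_cons]

-- A's first loop computes (a + countP matched, b + countP unmatched)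
theorem foldl_tpfp (c : String → Bool) (L : List String) (a b : Int) :
    L.foldl (fun s i => if c i then (s.1 + 1, s.2) else (s.1, s.2 + 1)) (a, b)
      = (a + L.countP c, b + L.countP (fun i => !c i)) := by
  induction L generalizing a b with
  | nil => simp
  | cons x L ih => by_cases h : c x <;> simp [List.foldl_cons, h, ih] <;> ring

-- A's second loop computes a + countP unmatched
theorem foldl_fn (c : String → Bool) (L : List String) (a : Int) :
    L.foldl (fun n i => if c i then n else n + 1) a = a + L.countP (fun i => !c i) := by
  induction L generalizing a with
  | nil => simp
  | cons x L ih => (by_cases h : c x <;> simp [List.foldl_cons, h, ih]); ring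

theorem countP_add_countP_not (L : List String) (c : String → Bool) :
    L.countP c + L.countP (fun x => !c x) = L.length := by
  induction L with
  | nil => rfl
  | cons a l ih => by_cases h : c a <;> simp [h] <;> omega

-- the substring index is exact: x ∈ subs(s) iff x is a substring of s
theorem mem_pvSubs (x s : String) : x ∈ pvSubs s ↔ PySem.Str.isIn x s = true := by
  unfold pvSubs
  rw [PySem.Set.mem_ofList]
  simp only [List.mem_flatMap, List.mem_map, PySem.List.mem_pyRange_one]
  rw [PySem.Str.isIn_iff_infix]
  constructor
  · rintro ⟨i, ⟨hi0, _⟩, j, ⟨hj0, _⟩, rfl⟩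
    have hj0' : (0 : Int) ≤ j := le_trans hi0 hj0
    lift i to ℕ using hi0
    lift j to ℕ using hj0'
    have hx : (PySem.Str.slice s (some (i : Int)) (some (j : Int))).toList
        = List.take (j - i) (List.drop i s.toList) := by
      simp only [PySem.Str.toList_slice, PySem.Chars.slice_eq_listSlice, PySem.List.slice_natCast]
    rw [hx]
    exact (List.take_prefix _ _).isInfix.trans (List.drop_suffix _ _).isInfix
  · intro hinf
    obtain ⟨t, u, hsu⟩ := hinf
    have hn : s.toList.length = t.length + x.toList.length + u.length := by
      rw [← hsu]; simp; omega
    refine ⟨(t.length : Int), ⟨by positivity, ?_⟩,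
      (t.length : Int) + (x.toList.length : Int), ⟨le_add_of_nonneg_right (by positivity), ?_⟩, ?_⟩
    · simp only [PySem.Str.len_eq]
      omega
    · simp only [PySem.Str.len_eq]
      omega
    · apply String.toList_inj.mp
      rw [PySem.Str.toList_slice, PySem.Chars.slice_eq_listSlice, PySem.List.slice_natCast_add,
        ← hsu, List.append_assoc, List.drop_left, List.take_left]

-- membership in the flattened index = some element of L has x as a substring
theorem mem_index (L : List String) (x : String) :
    x ∈ PySem.Set.ofList (L.flatMap (fun t => pvSubs t)) ↔ ∃ t ∈ L, PySem.Str.isIn x t = true := by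
  rw [PySem.Set.mem_ofList]
  simp only [List.mem_flatMap]
  exact ⟨fun ⟨t, ht, hx⟩ => ⟨t, ht, (mem_pvSubs x t).mp hx⟩,
    fun ⟨t, ht, hx⟩ => ⟨t, ht, (mem_pvSubs x t).mpr hx⟩⟩

theorem isdisjoint_false_iff (t : String) (L : PySem.Set String) :
    PySem.Set.isdisjoint (pvSubs t) L = false ↔ ∃ p ∈ L, PySem.Str.isIn p t = true := by
  rw [show (PySem.Set.isdisjoint (pvSubs t) L = false) ↔ ∃ x ∈ pvSubs t, x ∈ L from by
    simp [PySem.Set.isdisjoint]]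
  exact ⟨fun ⟨x, hx, hL⟩ => ⟨x, hL, (mem_pvSubs x t).mp hx⟩,
    fun ⟨p, hL, hp⟩ => ⟨p, (mem_pvSubs p t).mpr hp, hL⟩⟩

-- B's tp-lookup condition coincides pointwise with A's any-scan condition
theorem condB_tp (T : PySem.Set String) (p : String) :
    (PySem.Set.contains (PySem.Set.ofList (T.flatMap (fun t => pvSubs t))) p
      || !(PySem.Set.isdisjoint (pvSubs p) T))
    = T.any (fun t => PySem.Str.isIn p t || PySem.Str.isIn t p) := by
  rw [Bool.eq_iff_iff]
  simp only [Bool.or_eq_true, Bool.not_eq_true', PySem.Set.contains_iff, mem_index,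
    isdisjoint_false_iff, List.any_eq_true, Bool.or_eq_true]
  constructor
  · rintro (⟨t, ht, h⟩ | ⟨t, ht, h⟩)
    · exact ⟨t, ht, Or.inl h⟩
    · exact ⟨t, ht, Or.inr h⟩
  · rintro ⟨t, ht, h | h⟩
    · exact Or.inl ⟨t, ht, h⟩
    · exact Or.inr ⟨t, ht, h⟩

-- B's fn-lookup condition is the negation of the same scan
theorem condB_fn (P : PySem.Set String) (t : String) :
    (!(PySem.Set.contains (PySem.Set.ofList (P.flatMap (fun p => pvSubs p))) t)
      && PySem.Set.isdisjoint (pvSubs t) P)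
    = !(P.any (fun j => PySem.Str.isIn t j || PySem.Str.isIn j t)) := by
  rw [← condB_tp P t, Bool.not_or, Bool.not_not]

-- ===== VERDICT =====
theorem Partial_F1_spec : Claim_equal_Partial_F1 := by
  intro pred true_ _
  show Partial_F1 pred true_ = Partial_F1_alt pred true_
  unfold Partial_F1 Partial_F1_alt
  have hbase : ((pred.map (fun p => PySem.Str.split₀ p)).flatMap (fun x => x)).map (fun y => PySem.Str.lower y)
      = pred.flatMap (fun p => (PySem.Str.split₀ p).map (fun y => PySem.Str.lower y)) := by
    simp [List.flatMap_def, List.map_flatten, Function.comp_def]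
  simp only [hbase]
  set P : PySem.Set String := PySem.Set.ofList (pred.flatMap (fun p => (PySem.Str.split₀ p).map (fun y => PySem.Str.lower y))) with hP
  set T : PySem.Set String := PySem.Set.ofList true_ with hT
  -- A's loops: break scans become `any`, folds become counts
  rw [show (fun (s : Int × Int) i => if pvMatchScan i T then (s.1 + 1, s.2) else (s.1, s.2 + 1))
        = (fun (s : Int × Int) i => if T.any (fun j => PySem.Str.isIn i j || PySem.Str.isIn j i) then (s.1 + 1, s.2) else (s.1, s.2 + 1)) from
      funext fun s => funext fun i => by rw [pvMatchScan_eq_any],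
    show (fun (n : Int) i => if pvMatchScan i P then n else n + 1)
        = (fun (n : Int) i => if P.any (fun j => PySem.Str.isIn i j || PySem.Str.isIn j i) then n else n + 1) from
      funext fun n => funext fun i => by rw [pvMatchScan_eq_any]]
  rw [foldl_tpfp, foldl_fn]
  -- B's lookup conditions are pointwise A's any-scans
  have htp : P.countP (fun p => PySem.Set.contains (PySem.Set.ofList (T.flatMap (fun t => pvSubs t))) p || !(PySem.Set.isdisjoint (pvSubs p) T))
      = P.countP (fun i => T.any (fun j => PySem.Str.isIn i j || PySem.Str.isIn j i)) :=
    List.countP_congr fun p _ => by rw [condB_tp]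
  have hfn : T.countP (fun t => !(PySem.Set.contains (PySem.Set.ofList (P.flatMap (fun p => pvSubs p))) t) && PySem.Set.isdisjoint (pvSubs t) P)
      = T.countP (fun i => !(P.any (fun j => PySem.Str.isIn i j || PySem.Str.isIn j i))) :=
    List.countP_congr fun t _ => by rw [condB_fn]
  simp only [htp, hfn]
  have h1 := countP_add_countP_not P (fun i => T.any (fun j => PySem.Str.isIn i j || PySem.Str.isIn j i))
  simp only [PySem.Set.len, Prod.mk.injEq, zero_add, and_true, true_and]
  omega
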